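-- pv_equiv track=rewrite | github.com/yuanzhengdelu/skill-installation-address | project-guardian/scripts/scan_project.py | generate_patterns_md
-- ===== SOURCE A (Python) =====
-- from collections import defaultdict
-- from typing import Dict, List, Set, Tuple
--
-- def generate_patterns_md(patterns: List[Dict]) -> str:
--     """生成 patterns.md 内容"""
--     save_types = defaultdict(list)
--     input_types = defaultdict(list)
--
--     for p in patterns:
--         if p['type'] in ['realtime', 'button', 'on_close']:
--             save_types[p['type']].append(p)
--         else:
--             input_types[p['type']].append(p)
--
--     md = """# 项目交互模式
--
-- > 此文件由 Project Guardian 自动生成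
-- > 请检查并修改以确保准确性
--
-- ## 保存模式
--
-- """
--
--     save_type_names = {
--         'realtime': '实时保存',
--         'button': '按钮保存',
--         'on_close': '关闭时保存'
--     }
--
--     for save_type, name in save_type_names.items():
--         if save_types[save_type]:
--             md += f"### {name}\n\n"
--             md += "| 文件 | 检测指标 |\n"
--             md += "|------|----------|\n"
--             for p in save_types[save_type][:5]:  # 最多显示5个
--                 md += f"| `{p['file']}` | {p['indicator']} |\n"
--             md += "\n"
--
--     md += """## 输入模式
--
-- """
--
--     input_type_names = {
--         'dropdown': '下拉菜单',
--         'text_input': '文本输入框',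
--         'list_select': '列表选择',
--         'checkbox_radio': '复选框/单选框'
--     }
--
--     for input_type, name in input_type_names.items():
--         if input_types[input_type]:
--             md += f"### {name}\n\n"
--             md += "| 文件 | 检测指标 |\n"
--             md += "|------|----------|\n"
--             for p in input_types[input_type][:5]:
--                 md += f"| `{p['file']}` | {p['indicator']} |\n"
--             md += "\n"
--
--     md += """## 总结
--
-- 基于扫描结果，建议在本项目中遵循以下规则：
--
-- 1. **保存模式**：[ ] 请根据上述检测结果填写主要的保存模式
-- 2. **输入模式**：[ ] 请根据上述检测结果填写主要的输入模式
--
-- > 请编辑此部分，明确项目应遵循的交互模式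
-- """
--
--     return md
-- ===== SOURCE B (Python) =====
-- _SAVE_TYPE_NAMES = [
--     ('realtime', '实时保存'),
--     ('button', '按钮保存'),
--     ('on_close', '关闭时保存'),
-- ]
--
-- _INPUT_TYPE_NAMES = [
--     ('dropdown', '下拉菜单'),
--     ('text_input', '文本输入框'),
--     ('list_select', '列表选择'),
--     ('checkbox_radio', '复选框/单选框'),
-- ]
--
-- _HEADER = """# 项目交互模式
--
-- > 此文件由 Project Guardian 自动生成
-- > 请检查并修改以确保准确性
--
-- ## 保存模式
--
-- """
--
-- _INPUT_HEADER = """## 输入模式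
--
-- """
--
-- _FOOTER = """## 总结
--
-- 基于扫描结果，建议在本项目中遵循以下规则：
--
-- 1. **保存模式**：[ ] 请根据上述检测结果填写主要的保存模式
-- 2. **输入模式**：[ ] 请根据上述检测结果填写主要的输入模式
--
-- > 请编辑此部分，明确项目应遵循的交互模式
-- """
--
--
-- def _section(name, rows):
--     lines = ["### " + name, "", "| 文件 | 检测指标 |", "|------|----------|"]
--     lines += ["| `{}` | {} |".format(p['file'], p['indicator']) for p in rows]
--     return "\n".join(lines) + "\n\n"
--
--
-- def generate_patterns_md(patterns):
--     """生成 patterns.md 内容 (rescan-per-type, join-based)"""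
--     parts = [_HEADER]
--     for t, name in _SAVE_TYPE_NAMES:
--         matches = [p for p in patterns if p['type'] == t]
--         if matches:
--             parts.append(_section(name, matches[:5]))
--     parts.append(_INPUT_HEADER)
--     for t, name in _INPUT_TYPE_NAMES:
--         matches = [p for p in patterns if p['type'] == t]
--         if matches:
--             parts.append(_section(name, matches[:5]))
--     parts.append(_FOOTER)
--     return "".join(parts)
-- ===== Notes on version B (the rewrite author's own statement) =====
-- stated objective: simpler
-- what changed: B drops A's defaultdict bucketing pass and its md += accumulation: for each of the seven fixed type names it filters the original pattern list on demand and builds each section as a '\n'.join of its lines, finally joining the collected parts into the report.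
import Mathlib
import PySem

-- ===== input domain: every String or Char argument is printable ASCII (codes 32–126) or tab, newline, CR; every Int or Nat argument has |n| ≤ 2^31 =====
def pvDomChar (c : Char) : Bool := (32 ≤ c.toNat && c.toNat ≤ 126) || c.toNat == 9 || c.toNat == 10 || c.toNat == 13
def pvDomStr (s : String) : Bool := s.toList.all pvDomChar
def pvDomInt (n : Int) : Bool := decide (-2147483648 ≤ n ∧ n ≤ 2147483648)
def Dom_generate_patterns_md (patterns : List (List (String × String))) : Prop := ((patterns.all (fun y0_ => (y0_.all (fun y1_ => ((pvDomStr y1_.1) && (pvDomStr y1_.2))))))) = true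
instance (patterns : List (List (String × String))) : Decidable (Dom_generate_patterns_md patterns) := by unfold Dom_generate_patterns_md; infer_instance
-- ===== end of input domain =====

-- B replaces A's defaultdict bucketing pass by an on-demand filter per type and builds
-- the report by joining parts/lines instead of repeated `md +=`; objective: simpler.

-- p[k] as first-match association-list lookup; "" only where the key is absent,
-- which Pre_ excludes (Python raises KeyError there).
def pvKey (p : List (String × String)) (k : String) : String :=
  (((p.find? (fun kv => kv.1 == k)).map Prod.snd).getD "")

def pvHasKey (p : List (String × String)) (k : String) : Bool :=
  p.any (fun kv => kv.1 == k)

-- the module's literal strings / type-name tables (identical text in A and B)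
def pvMdHead : String := "# 项目交互模式\n\n> 此文件由 Project Guardian 自动生成\n> 请检查并修改以确保准确性\n\n## 保存模式\n\n"
def pvInputHead : String := "## 输入模式\n\n"
def pvMdFoot : String := "## 总结\n\n基于扫描结果，建议在本项目中遵循以下规则：\n\n1. **保存模式**：[ ] 请根据上述检测结果填写主要的保存模式\n2. **输入模式**：[ ] 请根据上述检测结果填写主要的输入模式\n\n> 请编辑此部分，明确项目应遵循的交互模式\n"
def pvSaveList : List String := ["realtime", "button", "on_close"]
def pvSaveNames : List (String × String) :=
  [("realtime", "实时保存"), ("button", "按钮保存"), ("on_close", "关闭时保存")]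
def pvInputNames : List (String × String) :=
  [("dropdown", "下拉菜单"), ("text_input", "文本输入框"), ("list_select", "列表选择"), ("checkbox_radio", "复选框/单选框")]


-- ===== PORT A =====
-- A: one bucketing pass into two defaultdict(list)s, then `md +=` loops reading the buckets.
def pvBucketStep
    (st : PySem.Dict String (List (List (String × String))) ×
          PySem.Dict String (List (List (String × String))))
    (p : List (String × String)) :
    PySem.Dict String (List (List (String × String))) ×
    PySem.Dict String (List (List (String × String))) :=
  if pvKey p "type" ∈ pvSaveList then
    (st.1.modify (pvKey p "type") [] (· ++ [p]), st.2)
  else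
    (st.1, st.2.modify (pvKey p "type") [] (· ++ [p]))

def generate_patterns_md (patterns : List (List (String × String))) : String :=
  let bucks := patterns.foldl pvBucketStep (PySem.Dict.empty, PySem.Dict.empty)
  let md := pvMdHead
  let md := pvSaveNames.foldl (fun md tn =>
      let l := bucks.1.getD tn.1 []
      if l.isEmpty then md
      else
        let md := md ++ "### " ++ tn.2 ++ "\n\n"
        let md := md ++ "| 文件 | 检测指标 |\n"
        let md := md ++ "|------|----------|\n"
        let md := (l.take 5).foldl (fun md p =>
          md ++ "| `" ++ pvKey p "file" ++ "` | " ++ pvKey p "indicator" ++ " |\n") md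
        md ++ "\n") md
  let md := md ++ pvInputHead
  let md := pvInputNames.foldl (fun md tn =>
      let l := bucks.2.getD tn.1 []
      if l.isEmpty then md
      else
        let md := md ++ "### " ++ tn.2 ++ "\n\n"
        let md := md ++ "| 文件 | 检测指标 |\n"
        let md := md ++ "|------|----------|\n"
        let md := (l.take 5).foldl (fun md p =>
          md ++ "| `" ++ pvKey p "file" ++ "` | " ++ pvKey p "indicator" ++ " |\n") md
        md ++ "\n") md
  md ++ pvMdFoot

-- ===== PORT B =====
def pvSection (name : String) (rows : List (List (String × String))) : String :=
  let lines := ["### " ++ name, "", "| 文件 | 检测指标 |", "|------|----------|"]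
    ++ rows.map (fun p => "| `" ++ pvKey p "file" ++ "` | " ++ pvKey p "indicator" ++ " |")
  PySem.Str.join "\n" lines ++ "\n\n"

def generate_patterns_md_alt (patterns : List (List (String × String))) : String :=
  let parts := [pvMdHead]
  let parts := pvSaveNames.foldl (fun parts tn =>
      let ms := patterns.filter (fun p => pvKey p "type" == tn.1)
      if ms.isEmpty then parts else parts ++ [pvSection tn.2 (ms.take 5)]) parts
  let parts := parts ++ [pvInputHead]
  let parts := pvInputNames.foldl (fun parts tn =>
      let ms := patterns.filter (fun p => pvKey p "type" == tn.1)
      if ms.isEmpty then parts else parts ++ [pvSection tn.2 (ms.take 5)]) parts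
  let parts := parts ++ [pvMdFoot]
  PySem.Str.join "" parts

-- ===== PRECONDITION & SPEC =====
-- Pre_: exactly where Python A returns — every pattern has a 'type' key, and every pattern
-- that would be displayed (its type among the seven table types and fewer than 5 earlier
-- patterns of the same type) also has 'file' and 'indicator' keys (else A raises KeyError).
def Pre_generate_patterns_md (patterns : List (List (String × String))) : Prop :=
  (∀ p ∈ patterns, pvHasKey p "type" = true) ∧
  (∀ i, (h : i < patterns.length) →
    pvKey patterns[i] "type" ∈ pvSaveList ++ ["dropdown", "text_input", "list_select", "checkbox_radio"] →
    (patterns.take i).countP (fun q => pvKey q "type" == pvKey patterns[i] "type") < 5 →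
    pvHasKey patterns[i] "file" = true ∧ pvHasKey patterns[i] "indicator" = true)
instance (patterns : List (List (String × String))) : Decidable (Pre_generate_patterns_md patterns) := by
  unfold Pre_generate_patterns_md; infer_instance
def pvWitness_generate_patterns_md : (List (List (String × String))) :=
  [[("type", "realtime"), ("file", "app.py"), ("indicator", "auto")],
   [("type", "dropdown"), ("file", "ui.py"), ("indicator", "select")],
   [("type", "misc")]]

def Spec_generate_patterns_md (patterns : List (List (String × String))) (out : String) : Prop := out = generate_patterns_md_alt patterns
instance (patterns : List (List (String × String))) (out : String) : Decidable (Spec_generate_patterns_md patterns out) := by unfold Spec_generate_patterns_md; infer_instance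

-- ===== CLAIM (what is proved, stated in full; the proofs are below) =====
def Claim_equal_generate_patterns_md : Prop := ∀ (patterns : List (List (String × String))), Dom_generate_patterns_md patterns → Pre_generate_patterns_md patterns → Spec_generate_patterns_md patterns (generate_patterns_md patterns)

-- ===== LEMMAS AND PROOFS =====

-- char-level row text of one table row (proof helper)
def pvRowC (p : List (String × String)) : List Char :=
  ("| `" ++ pvKey p "file" ++ "` | " ++ pvKey p "indicator" ++ " |").toList

-- rows each followed by a newline (proof helper)
def pvCatC : List (List Char) → List Char
  | [] => []
  | r :: rs => r ++ '\n' :: pvCatC rs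


theorem pv_join_cat (rs : List (List Char)) (r : List Char) :
    PySem.Chars.join ['\n'] (r :: rs) ++ ['\n'] = pvCatC (r :: rs) := by
  induction rs generalizing r with
  | nil => simp [PySem.Chars.join_singleton, pvCatC]
  | cons q rs ih =>
    rw [PySem.Chars.join_cons_cons]
    simp only [List.append_assoc]
    rw [ih q]
    simp [pvCatC]

theorem pv_join0_append (l : List String) (x : String) :
    PySem.Str.join "" (l ++ [x]) = PySem.Str.join "" l ++ x := by
  rw [← String.toList_inj]
  simp only [PySem.Str.toList_join, String.toList_append, List.map_append, List.map_cons, List.map_nil]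
  generalize (l.map String.toList) = rs
  induction rs with
  | nil => simp [PySem.Chars.join_singleton, PySem.Chars.join_nil]
  | cons a rs ih =>
    cases rs with
    | nil => simp [PySem.Chars.join_singleton, PySem.Chars.join_cons_cons]
    | cons b rs =>
      simp only [List.cons_append] at *
      rw [PySem.Chars.join_cons_cons, PySem.Chars.join_cons_cons, ih]
      simp [List.append_assoc]

theorem pv_rows (l : List (List (String × String))) (a : String) :
    (l.foldl (fun md p => md ++ "| `" ++ pvKey p "file" ++ "` | " ++ pvKey p "indicator" ++ " |\n") a).toList
      = a.toList ++ pvCatC (l.map pvRowC) := by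
  induction l generalizing a with
  | nil => simp [pvCatC]
  | cons p l ih => simp [List.foldl_cons, ih, pvCatC, pvRowC]

theorem pv_sec (md n : String) (l : List (List (String × String))) :
    ((l.foldl (fun md p => md ++ "| `" ++ pvKey p "file" ++ "` | " ++ pvKey p "indicator" ++ " |\n")
        (md ++ "### " ++ n ++ "\n\n" ++ "| 文件 | 检测指标 |\n" ++ "|------|----------|\n")) ++ "\n")
      = md ++ pvSection n l := by
  rw [← String.toList_inj]
  simp only [String.toList_append, pv_rows, pvSection, PySem.Str.toList_join,
    List.map_cons, List.cons_append, List.nil_append]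
  rw [show ("\n" : String).toList = ['\n'] from rfl,
      PySem.Chars.join_cons_cons, PySem.Chars.join_cons_cons, PySem.Chars.join_cons_cons,
      show ("\n\n" : String).toList = ['\n'] ++ ['\n'] from rfl]
  have h := pv_join_cat (List.map String.toList (List.map (fun p => "| `" ++ pvKey p "file" ++ "` | " ++ pvKey p "indicator" ++ " |") l)) ("|------|----------|".toList)
  simp only [List.append_assoc]
  rw [← List.append_assoc (PySem.Chars.join ['\n'] ("|------|----------|".toList :: List.map String.toList (List.map (fun p => "| `" ++ pvKey p "file" ++ "` | " ++ pvKey p "indicator" ++ " |") l))) ['\n'] ['\n'],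
      h]
  simp [pvCatC, pvRowC, Function.comp, List.append_assoc]
  have hfun : pvRowC = (String.toList ∘ fun p => "| `" ++ pvKey p "file" ++ "` | " ++ pvKey p "indicator" ++ " |") := by
    funext p; simp [pvRowC, Function.comp]
  rw [hfun]

theorem pv_bucket1 (ps : List (List (String × String)))
    (st : PySem.Dict String (List (List (String × String))) ×
          PySem.Dict String (List (List (String × String))))
    (t : String) (ht : t ∈ pvSaveList) :
    ((ps.foldl pvBucketStep st).1).getD t []
      = st.1.getD t [] ++ ps.filter (fun p => pvKey p "type" == t) := by
  induction ps generalizing st with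
  | nil => simp
  | cons p ps ih =>
    rw [List.foldl_cons, ih]
    by_cases hmem : pvKey p "type" ∈ pvSaveList
    · by_cases heq : pvKey p "type" = t
      · simp [pvBucketStep, hmem, heq, ht, PySem.Dict.getD_modify_self, List.filter_cons,
          List.append_assoc]
      · simp [pvBucketStep, hmem, PySem.Dict.getD_modify_of_ne _ _ _ (Ne.symm heq), List.filter_cons, heq]
    · have hne : pvKey p "type" ≠ t := fun h => hmem (h ▸ ht)
      simp [pvBucketStep, hmem, List.filter_cons, hne]

theorem pv_bucket2 (ps : List (List (String × String)))
    (st : PySem.Dict String (List (List (String × String))) ×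
          PySem.Dict String (List (List (String × String))))
    (t : String) (ht : t ∉ pvSaveList) :
    ((ps.foldl pvBucketStep st).2).getD t []
      = st.2.getD t [] ++ ps.filter (fun p => pvKey p "type" == t) := by
  induction ps generalizing st with
  | nil => simp
  | cons p ps ih =>
    rw [List.foldl_cons, ih]
    by_cases hmem : pvKey p "type" ∈ pvSaveList
    · have hne : pvKey p "type" ≠ t := fun h => ht (h ▸ hmem)
      simp [pvBucketStep, hmem, List.filter_cons, hne]
    · by_cases heq : pvKey p "type" = t
      · simp [pvBucketStep, hmem, heq, ht, PySem.Dict.getD_modify_self, List.filter_cons,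
          List.append_assoc]
      · simp [pvBucketStep, hmem, PySem.Dict.getD_modify_of_ne _ _ _ (Ne.symm heq), List.filter_cons, heq]

theorem pv_join0_single (x : String) : PySem.Str.join "" [x] = x := by
  rw [← String.toList_inj]
  simp [PySem.Str.toList_join, PySem.Chars.join_singleton]

theorem pv_step (md : String) (parts : List String) (name : String)
    (l : List (List (String × String))) (hmd : md = PySem.Str.join "" parts) :
    (if l.isEmpty then md
     else ((l.take 5).foldl (fun md p => md ++ "| `" ++ pvKey p "file" ++ "` | " ++ pvKey p "indicator" ++ " |\n")
            (md ++ "### " ++ name ++ "\n\n" ++ "| 文件 | 检测指标 |\n" ++ "|------|----------|\n")) ++ "\n")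
    = PySem.Str.join "" (if l.isEmpty then parts else parts ++ [pvSection name (l.take 5)]) := by
  by_cases h : l.isEmpty
  · simp [h, hmd]
  · simp only [h, Bool.false_eq_true, if_false, pv_sec, pv_join0_append, hmd]

theorem pv_mid (md : String) (parts : List String) (x : String)
    (hmd : md = PySem.Str.join "" parts) : md ++ x = PySem.Str.join "" (parts ++ [x]) := by
  rw [hmd, pv_join0_append]

set_option maxRecDepth 4096 in
theorem pv_main (patterns : List (List (String × String))) :
    generate_patterns_md patterns = generate_patterns_md_alt patterns := by
  unfold generate_patterns_md generate_patterns_md_alt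
  simp only [pvSaveNames, pvInputNames, List.foldl_cons, List.foldl_nil]
  rw [pv_bucket1 patterns _ "realtime" (by decide), pv_bucket1 patterns _ "button" (by decide),
      pv_bucket1 patterns _ "on_close" (by decide), pv_bucket2 patterns _ "dropdown" (by decide),
      pv_bucket2 patterns _ "text_input" (by decide), pv_bucket2 patterns _ "list_select" (by decide),
      pv_bucket2 patterns _ "checkbox_radio" (by decide)]
  have hempty : ∀ t : String, (PySem.Dict.empty : PySem.Dict String (List (List (String × String)))).getD t [] = [] := by
    intro t; simp [pysem]
  simp only [hempty, List.nil_append]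
  have h0 : pvMdHead = PySem.Str.join "" [pvMdHead] := (pv_join0_single _).symm
  have h1 := pv_step _ _ "实时保存" (patterns.filter (fun p => pvKey p "type" == "realtime")) h0
  have h2 := pv_step _ _ "按钮保存" (patterns.filter (fun p => pvKey p "type" == "button")) h1
  have h3 := pv_step _ _ "关闭时保存" (patterns.filter (fun p => pvKey p "type" == "on_close")) h2
  have h4 := pv_step _ _ "下拉菜单" (patterns.filter (fun p => pvKey p "type" == "dropdown")) (pv_mid _ _ pvInputHead h3)
  have h5 := pv_step _ _ "文本输入框" (patterns.filter (fun p => pvKey p "type" == "text_input")) h4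
  have h6 := pv_step _ _ "列表选择" (patterns.filter (fun p => pvKey p "type" == "list_select")) h5
  have h7 := pv_step _ _ "复选框/单选框" (patterns.filter (fun p => pvKey p "type" == "checkbox_radio")) h6
  exact pv_mid _ _ pvMdFoot h7

-- ===== VERDICT (by name: the statement is the Claim_ definition above) =====
theorem generate_patterns_md_spec : Claim_equal_generate_patterns_md := by
  intro patterns _ _
  unfold Spec_generate_patterns_md
  exact pv_main patterns
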